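-- pv_equiv track=rewrite | github.com/Kier73/Generative-Memory | bindings-python/gmem/media_bridge.py | calculate_order
-- ===== SOURCE A (Python) =====
-- def calculate_order(width: int, height: int) -> int:
--     """Calculates the necessary power-of-2 Hilbert order to fit the image."""
--     max_dim = max(width, height)
--     # Find next power of 2
--     p = 1
--     order = 0
--     while p < max_dim:
--         p *= 2
--         order += 1
--     return order
-- ===== SOURCE B (Python) =====
-- def calculate_order(width: int, height: int) -> int:
--     """Calculates the necessary power-of-2 Hilbert order to fit the image."""
--     max_dim = max(width, height)
--     return (max_dim - 1).bit_length() if max_dim > 1 else 0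
-- ===== Notes on version B (the rewrite author's own statement) =====
-- stated objective: simpler
-- what changed: Replaces the doubling while-loop with the closed form (max_dim-1).bit_length(), guarded by max_dim > 1 so that inputs with max(width,height) <= 1 still yield 0.
import Mathlib
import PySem

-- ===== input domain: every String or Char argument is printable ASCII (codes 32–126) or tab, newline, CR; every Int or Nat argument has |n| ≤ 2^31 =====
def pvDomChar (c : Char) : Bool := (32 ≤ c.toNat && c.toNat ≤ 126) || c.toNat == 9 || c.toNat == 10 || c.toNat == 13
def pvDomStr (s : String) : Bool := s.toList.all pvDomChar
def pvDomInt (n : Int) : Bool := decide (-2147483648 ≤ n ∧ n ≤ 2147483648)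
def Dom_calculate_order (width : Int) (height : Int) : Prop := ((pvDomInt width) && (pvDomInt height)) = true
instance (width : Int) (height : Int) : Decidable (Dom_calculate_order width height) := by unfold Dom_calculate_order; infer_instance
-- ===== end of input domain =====

-- B replaces A's doubling while-loop with the closed form (max_dim-1).bit_length() guarded by max_dim > 1 (simpler).


-- ===== PORT A =====
-- A's while-loop: p starts at 1 and doubles; we carry p as p'+1 (p' : Nat) so the
-- doubling step 2*(p'+1) = (2*p'+1)+1 keeps p ≥ 1 by construction and the loop terminates.
def calculate_order_loop (max_dim : Int) (p' : Nat) (order : Int) : Int :=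
  if ((p' + 1 : Nat) : Int) < max_dim then
    calculate_order_loop max_dim (2 * p' + 1) (order + 1)
  else order
termination_by (max_dim - (p' + 1)).toNat
decreasing_by omega

def calculate_order (width : Int) (height : Int) : Int :=
  let max_dim := max width height
  calculate_order_loop max_dim 0 0

-- ===== PORT B =====
def calculate_order_alt (width : Int) (height : Int) : Int :=
  let max_dim := max width height
  if 1 < max_dim then ((PySem.Int.bitLength (max_dim - 1) : Nat) : Int) else 0

-- ===== PRECONDITION & SPEC =====
def Spec_calculate_order (width : Int) (height : Int) (out : Int) : Prop := out = calculate_order_alt width height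
instance (width : Int) (height : Int) (out : Int) : Decidable (Spec_calculate_order width height out) := by unfold Spec_calculate_order; infer_instance

-- ===== CLAIM (what is proved, stated in full; the proofs are below) =====
def Claim_equal_calculate_order : Prop := ∀ (width : Int) (height : Int), Dom_calculate_order width height → Spec_calculate_order width height (calculate_order width height)

-- ===== LEMMAS AND PROOFS =====

-- Characterisation of A's loop: from p = p'+1 ≥ 1 it either stops at once (m ≤ p)
-- or returns order + k + 1 where p·2^k < m ≤ p·2^(k+1).
theorem calculate_order_loop_char (n : Nat) :
    ∀ (m : Int) (p' : Nat) (o : Int), (m - (p' + 1)).toNat = n →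
      (calculate_order_loop m p' o = o ∧ m ≤ ((p' + 1 : Nat) : Int)) ∨
      (∃ k : Nat, calculate_order_loop m p' o = o + k + 1 ∧
        ((p' + 1 : Nat) : Int) * 2 ^ k < m ∧ m ≤ ((p' + 1 : Nat) : Int) * 2 ^ (k + 1)) := by
  induction n using Nat.strong_induction_on with
  | _ n ih =>
    intro m p' o hn
    rw [calculate_order_loop]
    by_cases h : ((p' + 1 : Nat) : Int) < m
    · simp only [h, if_pos]
      have hlt : (m - (2 * p' + 1 + 1)).toNat < n := by omega
      rcases ih _ hlt m (2 * p' + 1) (o + 1) rfl with ⟨heq, hle⟩ | ⟨k, heq, hk1, hk2⟩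
      · right
        refine ⟨0, by omega, ?_, ?_⟩ <;> push_cast <;> push_cast at hle <;> omega
      · right
        refine ⟨k + 1, by omega, ?_, ?_⟩
        · have : ((p' + 1 : Nat) : Int) * 2 ^ (k + 1) = ((2 * p' + 1 + 1 : Nat) : Int) * 2 ^ k := by
            push_cast; ring
          rw [this]; exact hk1
        · have : ((p' + 1 : Nat) : Int) * 2 ^ (k + 1 + 1) = ((2 * p' + 1 + 1 : Nat) : Int) * 2 ^ (k + 1) := by
            push_cast; ring
          rw [this]; exact hk2
    · left
      refine ⟨?_, by push_cast at h ⊢; omega⟩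
      rw [if_neg h]

-- Uniqueness of the dyadic bracket 2^k < m ≤ 2^(k+1) matches bitLength (m-1).
theorem loop_eq_bitLength (m : Int) (hm : 1 < m) :
    calculate_order_loop m 0 0 = ((PySem.Int.bitLength (m - 1) : Nat) : Int) := by
  rcases calculate_order_loop_char (m - 1).toNat m 0 0 (by omega) with ⟨_, hle⟩ | ⟨k, heq, hk1, hk2⟩
  · norm_num at hle; omega
  · norm_num at hk1 hk2
    have hne : m - 1 ≠ 0 := by omega
    have hlo := PySem.Int.two_pow_bitLength_le (m - 1) hne
    have hhi := PySem.Int.lt_two_pow_bitLength (m - 1)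
    set L := PySem.Int.bitLength (m - 1) with hL
    have habs : (m - 1).natAbs = (m - 1).toNat := by omega
    rw [habs] at hlo hhi
    have hk1' : (((2:Nat) ^ k : Nat) : Int) < m := by exact_mod_cast hk1
    have hk2' : m ≤ (((2:Nat) ^ (k + 1) : Nat) : Int) := by exact_mod_cast hk2
    have hx1 : 2 ^ k ≤ (m - 1).toNat := by omega
    have hx2 : (m - 1).toNat < 2 ^ (k + 1) := by omega
    have hLpos : 1 ≤ L := by
      by_contra hc
      have h0 : L = 0 := by omega
      rw [h0, pow_zero] at hhi
      omega
    have hLk : L = k + 1 := by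
      by_contra hc
      rcases Nat.lt_or_ge L (k + 1) with hlt | hge
      · have : (2:Nat) ^ L ≤ 2 ^ k := Nat.pow_le_pow_right (by norm_num) (by omega)
        omega
      · have : (2:Nat) ^ (k + 1) ≤ 2 ^ (L - 1) := Nat.pow_le_pow_right (by norm_num) (by omega)
        omega
    rw [heq, hLk]; push_cast; ring

-- ===== VERDICT (by name: the statement is the Claim_ definition above) =====
theorem calculate_order_spec : Claim_equal_calculate_order := by
  intro width height _
  unfold Spec_calculate_order calculate_order calculate_order_alt
  set m := max width height with hm
  by_cases h : 1 < m
  · simp only [h, if_pos]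
    exact loop_eq_bitLength m h
  · rw [if_neg h, calculate_order_loop, if_neg (by push_cast; omega)]
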